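-- pv_equiv track=rewrite | github.com/hirak214/USC-CSCI_570-AOA_Project | efficient_3.py | get_forward_dp
-- ===== SOURCE A (Python) =====
-- GAP_COST = 30
--
-- mismatched_cost = {
--     ('A', 'A'): 0,   ('A', 'C'): 110, ('A', 'G'): 48,  ('A', 'T'): 94,
--     ('C', 'A'): 110, ('C', 'C'): 0,   ('C', 'G'): 118, ('C', 'T'): 48,
--     ('G', 'A'): 48,  ('G', 'C'): 118, ('G', 'G'): 0,   ('G', 'T'): 110,
--     ('T', 'A'): 94,  ('T', 'C'): 48,  ('T', 'G'): 110, ('T', 'T'): 0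
-- }
--
-- def get_forward_dp(x_part, y_part):
--     m = len(x_part)
--     n = len(y_part)
--     prev_row = [GAP_COST * j for j in range(n+1)]
--     for i in range(1, m+1):
--         current_row = [0] * (n+1)
--         current_row[0] = prev_row[0] + GAP_COST
--         for j in range(1, n+1):
--             match = prev_row[j-1] + mismatched_cost[(x_part[i-1], y_part[j-1])]
--             delete = prev_row[j] + GAP_COST
--             insert = current_row[j-1] + GAP_COST
--             current_row[j] = min(match, delete, insert)
--         prev_row = current_row
--     return prev_row
-- ===== SOURCE B (Python) =====
-- GAP_COST = 30
--
-- mismatched_cost = {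
--     ('A', 'A'): 0,   ('A', 'C'): 110, ('A', 'G'): 48,  ('A', 'T'): 94,
--     ('C', 'A'): 110, ('C', 'C'): 0,   ('C', 'G'): 118, ('C', 'T'): 48,
--     ('G', 'A'): 48,  ('G', 'C'): 118, ('G', 'G'): 0,   ('G', 'T'): 110,
--     ('T', 'A'): 94,  ('T', 'C'): 48,  ('T', 'G'): 110, ('T', 'T'): 0
-- }
--
--
-- def get_forward_dp(x_part, y_part):
--     # Top-down demand-driven DP: memoized prefix-alignment costs computed by an
--     # explicit work stack (two-phase expand/resolve), no bottom-up row table.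
--     m, n = len(x_part), len(y_part)
--     memo = {}
--     stack = [(m, j, False) for j in range(n + 1)]
--     while stack:
--         i, j, resolved = stack.pop()
--         if (i, j) in memo:
--             continue
--         if i == 0:
--             memo[(i, j)] = GAP_COST * j
--         elif j == 0:
--             memo[(i, j)] = GAP_COST * i
--         elif resolved:
--             memo[(i, j)] = min(
--                 memo[(i - 1, j - 1)] + mismatched_cost[(x_part[i - 1], y_part[j - 1])],
--                 memo[(i - 1, j)] + GAP_COST,
--                 memo[(i, j - 1)] + GAP_COST)
--         else:
--             stack.append((i, j, True))
--             stack.extend([(i - 1, j - 1, False), (i - 1, j, False), (i, j - 1, False)])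
--     return [memo[(m, j)] for j in range(n + 1)]
-- ===== Notes on version B (the rewrite author's own statement) =====
-- stated objective: alternative
-- what changed: B replaces A's bottom-up rolling-row table with top-down demand-driven dynamic programming: prefix-alignment costs are memoized in a dictionary and computed by an explicit two-phase (expand/resolve) work stack seeded with the bottom-row cells, and the returned row is read out of the memo.
import Mathlib
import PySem

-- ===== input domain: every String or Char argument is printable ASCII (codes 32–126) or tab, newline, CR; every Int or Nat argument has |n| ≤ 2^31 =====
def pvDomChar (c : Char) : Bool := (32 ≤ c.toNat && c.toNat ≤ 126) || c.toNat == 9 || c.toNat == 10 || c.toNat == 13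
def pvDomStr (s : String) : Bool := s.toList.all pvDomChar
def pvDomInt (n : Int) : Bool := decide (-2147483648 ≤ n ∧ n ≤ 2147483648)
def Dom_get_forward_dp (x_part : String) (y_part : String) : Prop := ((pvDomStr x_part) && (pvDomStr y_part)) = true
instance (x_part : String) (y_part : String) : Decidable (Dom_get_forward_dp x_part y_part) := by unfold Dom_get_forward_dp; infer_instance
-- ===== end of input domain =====

-- B replaces A's bottom-up rolling-row table with top-down demand-driven memoization
-- (a dictionary memo filled by an explicit expand/resolve work stack); objective:
-- alternative algorithm, same O(m*n) cost.

-- ===== PORT A =====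
-- the module constant mismatched_cost (shared by both Pythons)
def mismatched_cost : PySem.Dict (Char × Char) Int := PySem.Dict.ofList
  [(('A','A'),0),  (('A','C'),110), (('A','G'),48),  (('A','T'),94),
   (('C','A'),110),(('C','C'),0),   (('C','G'),118), (('C','T'),48),
   (('G','A'),48), (('G','C'),118), (('G','G'),0),   (('G','T'),110),
   (('T','A'),94), (('T','C'),48),  (('T','G'),110), (('T','T'),0)]

-- mismatched_cost[(a, b)]: exact wherever the key is present; the KeyError case
-- (a missing key ever looked up) is excluded by Pre_get_forward_dp.
def costOf (a b : Char) : Int := (PySem.Dict.get? mismatched_cost (a, b)).getD 0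

-- inner j-loop of A: walks prev_row (diag = prev_row[j-1], then prev_row[j:]),
-- the remaining y chars, and current_row[j-1] as curLast
def innerA (xi : Char) : Int → List Int → List Char → Int → List Int
  | _, _, [], _ => []
  | _, [], _, _ => []
  | diag, pj :: prest, yc :: yrest, curLast =>
    let v := min (min (diag + costOf xi yc) (pj + 30)) (curLast + 30)
    v :: innerA xi pj prest yrest v

-- one iteration of A's outer i-loop: build current_row from prev_row
def rowA (xi : Char) (ys : List Char) : List Int → List Int
  | [] => []
  | p0 :: rest => (p0 + 30) :: innerA xi p0 rest ys (p0 + 30)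

def get_forward_dp (x_part : String) (y_part : String) : List Int :=
  let ys := y_part.toList
  x_part.toList.foldl (fun prev xi => rowA xi ys prev)
    ((List.range (ys.length + 1)).map (fun (j : Nat) => 30 * (j : Int)))

-- ===== PORT B =====
-- work-stack entry (i, j, resolved); i, j are the (always nonnegative) prefix
-- lengths of Python's int tuple entries
-- termination weight of one stack entry and of the whole stack
def wgtB : Nat × Nat × Bool → Nat
  | (i, j, false) => 2 * 8 ^ (i + j) + 1
  | (i, j, true) => 8 ^ (i + j) + 1

def stackW (st : List (Nat × Nat × Bool)) : Nat := (st.map wgtB).sum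

-- weights are positive (used by loopB's termination proof)
lemma wgtB_pos (e : Nat × Nat × Bool) : 1 ≤ wgtB e := by
  obtain ⟨i, j, b⟩ := e
  cases b <;> simp [wgtB]

-- the while loop of B: pop an entry, skip / base-case / resolve from memoized
-- dependencies / expand (re-push as resolved below the three dependencies).
-- memo[...] reads in the resolve branch and x_part[i-1]/y_part[j-1] are ported
-- with .getD defaults: exact, since a resolved entry has its dependencies
-- memoized and 1 ≤ i ≤ len(x_part), 1 ≤ j ≤ len(y_part) (proved below).
def loopB (xs ys : List Char) : List (Nat × Nat × Bool) → PySem.Dict (Nat × Nat) Int → PySem.Dict (Nat × Nat) Int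
  | [], memo => memo
  | (i, j, resolved) :: rest, memo =>
    if ((PySem.Dict.get? memo (i, j)).isSome) then
      loopB xs ys rest memo
    else if i = 0 then
      loopB xs ys rest (PySem.Dict.insert memo (i, j) (30 * (j : Int)))
    else if j = 0 then
      loopB xs ys rest (PySem.Dict.insert memo (i, j) (30 * (i : Int)))
    else if resolved then
      loopB xs ys rest (PySem.Dict.insert memo (i, j)
        (min (min ((PySem.Dict.get? memo (i - 1, j - 1)).getD 0
                     + costOf (xs.getD (i - 1) 'A') (ys.getD (j - 1) 'A'))
                  ((PySem.Dict.get? memo (i - 1, j)).getD 0 + 30))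
             ((PySem.Dict.get? memo (i, j - 1)).getD 0 + 30)))
    else
      loopB xs ys
        ((i, j - 1, false) :: (i - 1, j, false) :: (i - 1, j - 1, false) :: (i, j, true) :: rest)
        memo
  termination_by st _ => stackW st
  decreasing_by
  · have h := wgtB_pos (i, j, resolved)
    simp only [stackW, List.map_cons, List.sum_cons]; omega
  · have h := wgtB_pos (i, j, resolved)
    simp only [stackW, List.map_cons, List.sum_cons]; omega
  · have h := wgtB_pos (i, j, resolved)
    simp only [stackW, List.map_cons, List.sum_cons]; omega
  · have h := wgtB_pos (i, j, resolved)
    simp only [stackW, List.map_cons, List.sum_cons]; omega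
  · rename_i _ hi hj hres
    have hb : resolved = false := by simpa using hres
    subst hb
    simp only [stackW, List.map_cons, List.sum_cons, wgtB]
    have h1 : 1 ≤ i := Nat.one_le_iff_ne_zero.mpr hi
    have h2 : 1 ≤ j := Nat.one_le_iff_ne_zero.mpr hj
    have e1 : i + j = (i + j - 2) + 1 + 1 := by omega
    have e2 : i + (j - 1) = (i + j - 2) + 1 := by omega
    have e3 : (i - 1) + j = (i + j - 2) + 1 := by omega
    have e4 : (i - 1) + (j - 1) = i + j - 2 := by omega
    rw [e1, e2, e3, e4, pow_succ, pow_succ]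
    have hv : 1 ≤ 8 ^ (i + j - 2) := Nat.one_le_pow _ _ (by omega)
    omega

def get_forward_dp_alt (x_part : String) (y_part : String) : List Int :=
  let xs := x_part.toList
  let ys := y_part.toList
  -- initial stack [(m, 0, False), …, (m, n, False)]; Python pops from the END,
  -- so the list is modeled top-first (reversed)
  let memo := loopB xs ys
    (((List.range (ys.length + 1)).map (fun j => (xs.length, j, false))).reverse)
    (PySem.Dict.empty)
  -- memo[(m, j)]: exact — every seeded cell is memoized when the loop ends (proved below)
  (List.range (ys.length + 1)).map (fun j => (PySem.Dict.get? memo (xs.length, j)).getD 0)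

-- ===== PRECONDITION & SPEC =====
-- Pre_ excludes exactly the inputs on which Python A raises KeyError: both strings
-- nonempty and some character outside 'ACGT' (B raises there too).
def Pre_get_forward_dp (x_part : String) (y_part : String) : Prop :=
  x_part = "" ∨ y_part = "" ∨
    ((x_part.toList ++ y_part.toList).all (fun c => c ∈ (['A', 'C', 'G', 'T'] : List Char))) = true
instance (x_part : String) (y_part : String) : Decidable (Pre_get_forward_dp x_part y_part) := by
  unfold Pre_get_forward_dp; infer_instance

def pvWitness_get_forward_dp : String × String := ("AC", "GT")

def Spec_get_forward_dp (x_part : String) (y_part : String) (out : List Int) : Prop := out = get_forward_dp_alt x_part y_part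
instance (x_part : String) (y_part : String) (out : List Int) : Decidable (Spec_get_forward_dp x_part y_part out) := by unfold Spec_get_forward_dp; infer_instance

-- ===== CLAIM (what is proved, stated in full; the proofs are below) =====
def Claim_equal_get_forward_dp : Prop := ∀ (x_part : String) (y_part : String), Dom_get_forward_dp x_part y_part → Pre_get_forward_dp x_part y_part → Spec_get_forward_dp x_part y_part (get_forward_dp x_part y_part)

-- ===== LEMMAS AND PROOFS =====

-- edit distance on suffixes (peels heads); applied to REVERSED prefixes below
def Espec : List Char → List Char → Int
  | [], ys => 30 * (ys.length : Int)
  | _ :: xs, [] => 30 * ((xs.length : Int) + 1)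
  | a :: xs, b :: ys =>
    min (min (Espec xs ys + costOf a b) (Espec xs (b :: ys) + 30))
        (Espec (a :: xs) ys + 30)
termination_by xs ys => (xs.length, ys.length)

-- the DP table value for prefixes p of x and q of y
def Dspec (p q : List Char) : Int := Espec p.reverse q.reverse

lemma D_nil_left (q : List Char) : Dspec [] q = 30 * (q.length : Int) := by
  simp [Dspec, Espec]

lemma E_nil_right : ∀ xs : List Char, Espec xs [] = 30 * (xs.length : Int)
  | [] => by simp [Espec]
  | _ :: xs => by simp [Espec]

lemma D_nil_right (p : List Char) : Dspec p [] = 30 * (p.length : Int) := by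
  simp [Dspec, E_nil_right]

lemma D_snoc_nil (p : List Char) (a : Char) : Dspec (p ++ [a]) [] = Dspec p [] + 30 := by
  simp [D_nil_right]; ring

lemma D_snoc_snoc (p q : List Char) (a b : Char) :
    Dspec (p ++ [a]) (q ++ [b]) =
      min (min (Dspec p q + costOf a b) (Dspec p (q ++ [b]) + 30))
          (Dspec (p ++ [a]) q + 30) := by
  simp only [Dspec, List.reverse_append, List.reverse_singleton, List.singleton_append]
  rw [Espec]

-- tail (indices 1..) of the DP row of x-prefix p, starting after y-prefix q
def tRow (p : List Char) (q : List Char) : List Char → List Int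
  | [] => []
  | y :: yr => Dspec p (q ++ [y]) :: tRow p (q ++ [y]) yr

lemma init_row (ys : List Char) : ∀ q : List Char,
    (List.range (ys.length + 1)).map (fun j => 30 * (((q.length + j : Nat)) : Int))
      = Dspec [] q :: tRow [] q ys := by
  induction ys with
  | nil => intro q; simp [tRow, D_nil_left]
  | cons y yr ih =>
    intro q
    rw [show (y :: yr).length + 1 = (yr.length + 1) + 1 from rfl,
        List.range_succ_eq_map]
    simp only [List.map_cons, List.map_map, tRow]
    refine List.cons_eq_cons.mpr ⟨by simp [D_nil_left], ?_⟩
    rw [← ih (q ++ [y])]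
    apply List.map_congr_left
    intro j _
    simp only [Function.comp_apply, List.length_append, List.length_singleton]
    congr 1
    omega

lemma innerA_spec (xi : Char) (p : List Char) : ∀ (yrest q : List Char),
    innerA xi (Dspec p q) (tRow p q yrest) yrest (Dspec (p ++ [xi]) q)
      = tRow (p ++ [xi]) q yrest := by
  intro yrest
  induction yrest with
  | nil => intro q; simp [innerA, tRow]
  | cons y yr ih =>
    intro q
    simp only [tRow, innerA]
    rw [← D_snoc_snoc p q xi y]
    exact congrArg (List.cons _) (ih (q ++ [y]))

lemma rowA_spec (xi : Char) (ys p : List Char) :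
    rowA xi ys (Dspec p [] :: tRow p [] ys) = Dspec (p ++ [xi]) [] :: tRow (p ++ [xi]) [] ys := by
  simp only [rowA, ← D_snoc_nil p xi]
  exact congrArg (List.cons _) (innerA_spec xi p ys [])

lemma foldA_spec (ys : List Char) : ∀ (xsuf p : List Char),
    xsuf.foldl (fun prev xi => rowA xi ys prev) (Dspec p [] :: tRow p [] ys)
      = Dspec (p ++ xsuf) [] :: tRow (p ++ xsuf) [] ys := by
  intro xsuf
  induction xsuf with
  | nil => intro p; simp
  | cons x xr ih =>
    intro p
    simp only [List.foldl_cons, rowA_spec, ih (p ++ [x]), List.append_assoc,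
      List.singleton_append]

lemma portA_eq (xs ys : List Char) :
    xs.foldl (fun prev xi => rowA xi ys prev)
      ((List.range (ys.length + 1)).map (fun (j : Nat) => 30 * (j : Int)))
      = Dspec xs [] :: tRow xs [] ys := by
  have h0 : (List.range (ys.length + 1)).map (fun (j : Nat) => 30 * (j : Int))
      = Dspec ([] : List Char) [] :: tRow [] [] ys := by
    have h := init_row ys []
    simp only [List.length_nil, Nat.zero_add] at h
    exact h
  rw [h0]
  have h := foldA_spec ys xs []
  simp only [List.nil_append] at h
  exact h

-- A's result row as a range-map of table values
lemma tRow_eq_map (p : List Char) : ∀ (yrest q : List Char),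
    tRow p q yrest
      = (List.range yrest.length).map (fun j => Dspec p (q ++ yrest.take (j + 1))) := by
  intro yrest
  induction yrest with
  | nil => intro q; simp [tRow]
  | cons y yr ih =>
    intro q
    rw [show (y :: yr).length = yr.length + 1 from rfl, List.range_succ_eq_map]
    simp only [tRow, List.map_cons, List.map_map, List.take_succ_cons, List.take_zero]
    refine List.cons_eq_cons.mpr ⟨rfl, ?_⟩
    rw [ih (q ++ [y])]
    apply List.map_congr_left
    intro j _
    simp [List.append_assoc]

-- the intended value of a memo cell
def cellT (xs ys : List Char) (i j : Nat) : Int := Dspec (xs.take i) (ys.take j)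

lemma cellT_rec (xs ys : List Char) (i j : Nat)
    (hi1 : 1 ≤ i) (him : i ≤ xs.length) (hj1 : 1 ≤ j) (hjn : j ≤ ys.length) :
    cellT xs ys i j =
      min (min (cellT xs ys (i - 1) (j - 1) + costOf (xs.getD (i - 1) 'A') (ys.getD (j - 1) 'A'))
               (cellT xs ys (i - 1) j + 30))
          (cellT xs ys i (j - 1) + 30) := by
  have hx : xs.take i = xs.take (i - 1) ++ [xs.getD (i - 1) 'A'] := by
    rw [show i = (i - 1) + 1 by omega]
    rw [List.getD_eq_getElem _ _ (by omega), ← List.take_concat_get (h := by omega),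
      List.concat_eq_append]
    simp
  have hy : ys.take j = ys.take (j - 1) ++ [ys.getD (j - 1) 'A'] := by
    rw [show j = (j - 1) + 1 by omega]
    rw [List.getD_eq_getElem _ _ (by omega), ← List.take_concat_get (h := by omega),
      List.concat_eq_append]
    simp
  unfold cellT
  calc Dspec (xs.take i) (ys.take j)
      = Dspec (xs.take (i - 1) ++ [xs.getD (i - 1) 'A'])
              (ys.take (j - 1) ++ [ys.getD (j - 1) 'A']) := by rw [← hx, ← hy]
    _ = _ := by rw [D_snoc_snoc, ← hx, ← hy]

-- memo invariant: every entry is an in-bounds, correct table value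
def GoodM (xs ys : List Char) (memo : PySem.Dict (Nat × Nat) Int) : Prop :=
  ∀ i j v, PySem.Dict.get? memo (i, j) = some v →
    i ≤ xs.length ∧ j ≤ ys.length ∧ v = cellT xs ys i j

-- stack invariant, threading the set of cells placed ABOVE (processed earlier):
-- every entry is in bounds, and a resolved entry's dependencies are memoized or above
def okEnt (xs ys : List Char) (memo : PySem.Dict (Nat × Nat) Int)
    (above : List (Nat × Nat)) : Nat × Nat × Bool → Prop
  | (i, j, false) => i ≤ xs.length ∧ j ≤ ys.length
  | (i, j, true) => 1 ≤ i ∧ i ≤ xs.length ∧ 1 ≤ j ∧ j ≤ ys.length ∧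
      (∀ d ∈ [((i : Nat) - 1, (j : Nat) - 1), (i - 1, j), (i, j - 1)],
        (PySem.Dict.get? memo d).isSome = true ∨ d ∈ above)

def okStack (xs ys : List Char) (memo : PySem.Dict (Nat × Nat) Int) :
    List (Nat × Nat × Bool) → List (Nat × Nat) → Prop
  | [], _ => True
  | e :: rest, above => okEnt xs ys memo above e ∧ okStack xs ys memo rest ((e.1, e.2.1) :: above)

-- A's row as a range-map of table values
lemma A_row_map (xs ys : List Char) :
    Dspec xs [] :: tRow xs [] ys
      = (List.range (ys.length + 1)).map (fun j => Dspec xs (ys.take j)) := by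
  rw [List.range_succ_eq_map]
  simp only [List.map_cons, List.map_map, List.take_zero]
  refine List.cons_eq_cons.mpr ⟨rfl, ?_⟩
  rw [tRow_eq_map xs ys []]
  apply List.map_congr_left
  intro j _
  simp

lemma GoodM_insert (xs ys : List Char) (memo : PySem.Dict (Nat × Nat) Int)
    (i j : Nat) (v : Int) (hG : GoodM xs ys memo)
    (hi : i ≤ xs.length) (hj : j ≤ ys.length) (hv : v = cellT xs ys i j) :
    GoodM xs ys (PySem.Dict.insert memo (i, j) v) := by
  intro a b w h
  rw [PySem.Dict.get?_insert] at h
  by_cases hab : ((a, b) : Nat × Nat) = (i, j)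
  · injection hab with ha hb
    subst ha; subst hb
    rw [if_pos rfl] at h
    injection h with h
    subst h
    exact ⟨hi, hj, hv⟩
  · rw [if_neg hab] at h
    exact hG a b w h

lemma isSome_insert (memo : PySem.Dict (Nat × Nat) Int) (k k' : Nat × Nat) (v : Int)
    (h : (PySem.Dict.get? memo k').isSome = true) :
    ((PySem.Dict.insert memo k v).get? k').isSome = true := by
  rw [PySem.Dict.get?_insert]
  split <;> simp [h]

lemma okStack_mono (xs ys : List Char) (memo memo' : PySem.Dict (Nat × Nat) Int)
    (hsub : ∀ k, (PySem.Dict.get? memo k).isSome = true → (PySem.Dict.get? memo' k).isSome = true) :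
    ∀ (st : List (Nat × Nat × Bool)) (ab ab' : List (Nat × Nat)),
      (∀ d ∈ ab, d ∈ ab' ∨ (PySem.Dict.get? memo' d).isSome = true) →
      okStack xs ys memo st ab → okStack xs ys memo' st ab' := by
  intro st
  induction st with
  | nil => intro ab ab' _ _; trivial
  | cons e rest ih =>
    intro ab ab' hab h
    obtain ⟨i, j, b⟩ := e
    obtain ⟨he, hrest⟩ := h
    refine ⟨?_, ih ((i, j) :: ab) ((i, j) :: ab') ?_ hrest⟩
    · cases b with
      | false => exact he
      | true =>
        obtain ⟨h1, h2, h3, h4, h5⟩ := he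
        refine ⟨h1, h2, h3, h4, ?_⟩
        intro d hd
        rcases h5 d hd with h | h
        · exact Or.inl (hsub d h)
        · rcases hab d h with h' | h'
          · exact Or.inr h'
          · exact Or.inl h'
    · intro d hd
      rcases List.mem_cons.mp hd with rfl | hd'
      · exact Or.inl (List.mem_cons_self ..)
      · rcases hab d hd' with h' | h'
        · exact Or.inl (List.mem_cons_of_mem _ h')
        · exact Or.inr h'

lemma okStack_of_all_false (xs ys : List Char) (memo : PySem.Dict (Nat × Nat) Int) :
    ∀ (l : List (Nat × Nat × Bool)) (ab : List (Nat × Nat)),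
      (∀ e ∈ l, e.2.2 = false ∧ e.1 ≤ xs.length ∧ e.2.1 ≤ ys.length) →
      okStack xs ys memo l ab := by
  intro l
  induction l with
  | nil => intro _ _; trivial
  | cons e rest ih =>
    intro ab h
    obtain ⟨i, j, b⟩ := e
    obtain ⟨hb, h1, h2⟩ := h _ (List.mem_cons_self ..)
    subst hb
    exact ⟨⟨h1, h2⟩, ih _ (fun e he => h e (List.mem_cons_of_mem _ he))⟩

-- one-step reduction lemmas for loopB (to unfold exactly one iteration)
lemma loopB_step_skip (xs ys : List Char) (i j : Nat) (r : Bool) (rest : List (Nat × Nat × Bool))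
    (memo : PySem.Dict (Nat × Nat) Int) (h : (PySem.Dict.get? memo (i, j)).isSome = true) :
    loopB xs ys ((i, j, r) :: rest) memo = loopB xs ys rest memo := by
  rw [loopB]
  rw [if_pos h]

lemma loopB_step_i0 (xs ys : List Char) (j : Nat) (r : Bool) (rest : List (Nat × Nat × Bool))
    (memo : PySem.Dict (Nat × Nat) Int) (h : ¬ (PySem.Dict.get? memo (0, j)).isSome = true) :
    loopB xs ys ((0, j, r) :: rest) memo
      = loopB xs ys rest (PySem.Dict.insert memo (0, j) (30 * (j : Int))) := by
  rw [loopB]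
  rw [if_neg h, if_pos rfl]

lemma loopB_step_j0 (xs ys : List Char) (i : Nat) (r : Bool) (rest : List (Nat × Nat × Bool))
    (memo : PySem.Dict (Nat × Nat) Int) (h : ¬ (PySem.Dict.get? memo (i, 0)).isSome = true)
    (hi : ¬ i = 0) :
    loopB xs ys ((i, 0, r) :: rest) memo
      = loopB xs ys rest (PySem.Dict.insert memo (i, 0) (30 * (i : Int))) := by
  rw [loopB]
  rw [if_neg h, if_neg hi, if_pos rfl]

lemma loopB_step_resolve (xs ys : List Char) (i j : Nat) (rest : List (Nat × Nat × Bool))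
    (memo : PySem.Dict (Nat × Nat) Int) (h : ¬ (PySem.Dict.get? memo (i, j)).isSome = true)
    (hi : ¬ i = 0) (hj : ¬ j = 0) :
    loopB xs ys ((i, j, true) :: rest) memo
      = loopB xs ys rest (PySem.Dict.insert memo (i, j)
          (min (min ((PySem.Dict.get? memo (i - 1, j - 1)).getD 0
                       + costOf (xs.getD (i - 1) 'A') (ys.getD (j - 1) 'A'))
                    ((PySem.Dict.get? memo (i - 1, j)).getD 0 + 30))
               ((PySem.Dict.get? memo (i, j - 1)).getD 0 + 30))) := by
  rw [loopB]
  rw [if_neg h, if_neg hi, if_neg hj, if_pos rfl]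

lemma loopB_step_expand (xs ys : List Char) (i j : Nat) (rest : List (Nat × Nat × Bool))
    (memo : PySem.Dict (Nat × Nat) Int) (h : ¬ (PySem.Dict.get? memo (i, j)).isSome = true)
    (hi : ¬ i = 0) (hj : ¬ j = 0) :
    loopB xs ys ((i, j, false) :: rest) memo
      = loopB xs ys
          ((i, j - 1, false) :: (i - 1, j, false) :: (i - 1, j - 1, false) :: (i, j, true) :: rest)
          memo := by
  rw [loopB]
  rw [if_neg h, if_neg hi, if_neg hj, if_neg (by simp)]

-- the loop invariant: from a correct memo and a well-formed stack, the loop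
-- produces a correct memo that (monotonically) contains every stack cell
lemma loopB_good (xs ys : List Char) : ∀ (st : List (Nat × Nat × Bool)) (memo : PySem.Dict (Nat × Nat) Int),
    GoodM xs ys memo → okStack xs ys memo st [] →
    GoodM xs ys (loopB xs ys st memo) ∧
    (∀ k, (PySem.Dict.get? memo k).isSome = true →
      (PySem.Dict.get? (loopB xs ys st memo) k).isSome = true) ∧
    (∀ e ∈ st, (PySem.Dict.get? (loopB xs ys st memo) (e.1, e.2.1)).isSome = true) := by
  intro st memo
  induction st, memo using loopB.induct xs ys with
  | case1 memo =>
    intro hG _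
    refine ⟨?_, ?_, by simp⟩
    · rw [loopB]; exact hG
    · intro k h; rw [loopB]; exact h
  | case2 i j resolved rest memo hmem ih =>
    intro hG hok
    obtain ⟨hent, hrest⟩ := hok
    have hok' : okStack xs ys memo rest [] :=
      okStack_mono xs ys memo memo (fun k h => h) rest [(i, j)] []
        (by intro d hd; rcases List.mem_singleton.mp hd with rfl; exact Or.inr hmem) hrest
    obtain ⟨g, mono, cells⟩ := ih hG hok'
    rw [loopB_step_skip xs ys i j resolved rest memo hmem]
    refine ⟨g, mono, ?_⟩
    intro e he
    rcases List.mem_cons.mp he with rfl | he'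
    · exact mono _ hmem
    · exact cells e he'
  | case3 j resolved rest memo hmem ih =>
    intro hG hok
    obtain ⟨hent, hrest⟩ := hok
    have hj2 : j ≤ ys.length := by
      revert hent
      cases resolved with
      | false => intro hent; exact hent.2
      | true => intro hent; exact hent.2.2.2.1
    have hG' : GoodM xs ys (PySem.Dict.insert memo (0, j) (30 * (j : Int))) :=
      GoodM_insert xs ys memo 0 j _ hG (Nat.zero_le _) hj2
        (by simp [cellT, D_nil_left, List.length_take, Nat.min_eq_left hj2])
    have hok' : okStack xs ys (PySem.Dict.insert memo (0, j) (30 * (j : Int))) rest [] :=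
      okStack_mono xs ys memo _ (fun k h => isSome_insert _ _ _ _ h) rest [(0, j)] []
        (by intro d hd; rcases List.mem_singleton.mp hd with rfl
            exact Or.inr (by rw [PySem.Dict.get?_insert_self]; rfl)) hrest
    obtain ⟨g, mono, cells⟩ := ih hG' hok'
    rw [loopB_step_i0 xs ys j resolved rest memo hmem]
    refine ⟨g, ?_, ?_⟩
    · intro k h
      exact mono k (isSome_insert _ _ _ _ h)
    · intro e he
      rcases List.mem_cons.mp he with rfl | he'
      · exact mono (0, j) (by rw [PySem.Dict.get?_insert_self]; rfl)
      · exact cells e he'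
  | case4 i resolved rest memo hi hmem ih =>
    intro hG hok
    obtain ⟨hent, hrest⟩ := hok
    have hi2 : i ≤ xs.length := by
      revert hent
      cases resolved with
      | false => intro hent; exact hent.1
      | true => intro hent; exact hent.2.1
    have hG' : GoodM xs ys (PySem.Dict.insert memo (i, 0) (30 * (i : Int))) :=
      GoodM_insert xs ys memo i 0 _ hG hi2 (Nat.zero_le _)
        (by simp [cellT, D_nil_right, List.length_take, Nat.min_eq_left hi2])
    have hok' : okStack xs ys (PySem.Dict.insert memo (i, 0) (30 * (i : Int))) rest [] :=
      okStack_mono xs ys memo _ (fun k h => isSome_insert _ _ _ _ h) rest [(i, 0)] []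
        (by intro d hd; rcases List.mem_singleton.mp hd with rfl
            exact Or.inr (by rw [PySem.Dict.get?_insert_self]; rfl)) hrest
    obtain ⟨g, mono, cells⟩ := ih hG' hok'
    rw [loopB_step_j0 xs ys i resolved rest memo hmem hi]
    refine ⟨g, ?_, ?_⟩
    · intro k h
      exact mono k (isSome_insert _ _ _ _ h)
    · intro e he
      rcases List.mem_cons.mp he with rfl | he'
      · exact mono (i, 0) (by rw [PySem.Dict.get?_insert_self]; rfl)
      · exact cells e he'
  | case5 i j rest memo hmem hi hj ih =>
    intro hG hok
    obtain ⟨hent, hrest⟩ := hok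
    obtain ⟨h1, h2, h3, h4, h5⟩ := hent
    have hdep : ∀ d ∈ [((i : Nat) - 1, (j : Nat) - 1), (i - 1, j), (i, j - 1)],
        PySem.Dict.get? memo d = some (cellT xs ys d.1 d.2) := by
      intro d hd
      rcases h5 d hd with h | h
      · obtain ⟨v, hv⟩ := Option.isSome_iff_exists.mp h
        obtain ⟨_, _, hval⟩ := hG d.1 d.2 v (by rw [← hv])
        rw [hv, hval]
      · simp at h
    have e1 := hdep (i - 1, j - 1) (by simp)
    have e2 := hdep (i - 1, j) (by simp)
    have e3 := hdep (i, j - 1) (by simp)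
    have hv : min (min ((PySem.Dict.get? memo (i - 1, j - 1)).getD 0
                     + costOf (xs.getD (i - 1) 'A') (ys.getD (j - 1) 'A'))
                  ((PySem.Dict.get? memo (i - 1, j)).getD 0 + 30))
             ((PySem.Dict.get? memo (i, j - 1)).getD 0 + 30) = cellT xs ys i j := by
      rw [e1, e2, e3, cellT_rec xs ys i j h1 h2 h3 h4]
      rfl
    have hG' := GoodM_insert xs ys memo i j _ hG h2 h4 hv
    have hok' : okStack xs ys (PySem.Dict.insert memo (i, j)
        (min (min ((PySem.Dict.get? memo (i - 1, j - 1)).getD 0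
                     + costOf (xs.getD (i - 1) 'A') (ys.getD (j - 1) 'A'))
                  ((PySem.Dict.get? memo (i - 1, j)).getD 0 + 30))
             ((PySem.Dict.get? memo (i, j - 1)).getD 0 + 30))) rest [] :=
      okStack_mono xs ys memo _ (fun k h => isSome_insert _ _ _ _ h) rest [(i, j)] []
        (by intro d hd; rcases List.mem_singleton.mp hd with rfl
            exact Or.inr (by rw [PySem.Dict.get?_insert_self]; rfl)) hrest
    obtain ⟨g, mono, cells⟩ := ih hG' hok'
    rw [loopB_step_resolve xs ys i j rest memo hmem hi hj]
    refine ⟨g, ?_, ?_⟩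
    · intro k h
      exact mono k (isSome_insert _ _ _ _ h)
    · intro e he
      rcases List.mem_cons.mp he with rfl | he'
      · exact mono (i, j) (by rw [PySem.Dict.get?_insert_self]; rfl)
      · exact cells e he'
  | case6 i j resolved rest memo hmem hi hj hres ih =>
    intro hG hok
    obtain ⟨hent, hrest⟩ := hok
    have hres' : resolved = false := by simpa using hres
    subst hres'
    obtain ⟨h1, h2⟩ := hent
    have hok' : okStack xs ys memo
        ((i, j - 1, false) :: (i - 1, j, false) :: (i - 1, j - 1, false) :: (i, j, true) :: rest) [] := by
      refine ⟨⟨h1, Nat.le_trans (Nat.sub_le _ _) h2⟩,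
              ⟨Nat.le_trans (Nat.sub_le _ _) h1, h2⟩,
              ⟨Nat.le_trans (Nat.sub_le _ _) h1, Nat.le_trans (Nat.sub_le _ _) h2⟩,
              ⟨Nat.one_le_iff_ne_zero.mpr hi, h1, Nat.one_le_iff_ne_zero.mpr hj, h2, ?_⟩, ?_⟩
      · intro d hd; right
        simp only [List.mem_cons, List.not_mem_nil, or_false] at hd ⊢
        tauto
      · exact okStack_mono xs ys memo memo (fun k h => h) rest [(i, j)] _
          (by intro d hd; rcases List.mem_singleton.mp hd with rfl; exact Or.inl (by simp)) hrest
    obtain ⟨g, mono, cells⟩ := ih hG hok'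
    rw [loopB_step_expand xs ys i j rest memo hmem hi hj]
    refine ⟨g, mono, ?_⟩
    intro e he
    rcases List.mem_cons.mp he with rfl | he'
    · exact cells (i, j, true) (by simp)
    · exact cells e (by simp [he'])

-- every bottom-row cell of the finished memo is present and correct
lemma portB_memo (xs ys : List Char) (j : Nat) (hj : j ≤ ys.length) :
    (PySem.Dict.get? (loopB xs ys
        (((List.range (ys.length + 1)).map (fun j => (xs.length, j, false))).reverse)
        (PySem.Dict.empty)) (xs.length, j)).getD 0
      = Dspec xs (ys.take j) := by
  have hGe : GoodM xs ys (PySem.Dict.empty) := by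
    intro a b v h
    rw [PySem.Dict.get?_empty] at h
    cases h
  have hoke : okStack xs ys (PySem.Dict.empty)
      (((List.range (ys.length + 1)).map (fun j => (xs.length, j, false))).reverse) [] := by
    apply okStack_of_all_false
    intro e he
    simp only [List.mem_reverse, List.mem_map, List.mem_range] at he
    obtain ⟨a, ha, rfl⟩ := he
    refine ⟨rfl, Nat.le_refl _, ?_⟩
    show a ≤ ys.length
    omega
  obtain ⟨g, _, cells⟩ := loopB_good xs ys _ _ hGe hoke
  have hmem : ((xs.length, j, false) : Nat × Nat × Bool) ∈
      ((List.range (ys.length + 1)).map (fun j => (xs.length, j, false))).reverse := by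
    simp only [List.mem_reverse, List.mem_map, List.mem_range]
    exact ⟨j, by omega, rfl⟩
  have hsome := cells _ hmem
  obtain ⟨v, hv⟩ := Option.isSome_iff_exists.mp hsome
  obtain ⟨_, _, hval⟩ := g xs.length j v hv
  simp only at hv
  rw [hv, hval]
  simp [cellT, List.take_length]

-- ===== VERDICT (by name: the statement is the Claim_ definition above) =====
theorem get_forward_dp_spec : Claim_equal_get_forward_dp := by
  intro x y _ _
  unfold Spec_get_forward_dp
  simp only [get_forward_dp, get_forward_dp_alt]
  rw [portA_eq x.toList y.toList, A_row_map]
  apply List.map_congr_left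
  intro j hj
  have hj' := List.mem_range.mp hj
  rw [portB_memo x.toList y.toList j (by omega)]
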